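-- pv_equiv track=rewrite | github.com/ElDaniCarvajal/Reportes-Automaticos | chido.py | compute_supported_unsupported_baseline
-- ===== SOURCE A (Python) =====
-- from typing import Dict, List, Optional, Sequence, Tuple
-- from typing import Any, Dict, List, Tuple, Optional
-- from typing import Dict, Any, Callable, Optional
--
-- def d_norm(x: Any) -> str:
--     return (str(x) if x is not None else "").strip()
--
-- def d_count_top(items: List[str]) -> List[Tuple[str, int]]:
--     d_: Dict[str, int] = {}
--     for x in items:
--         x = d_norm(x) or "Unknown"
--         d_[x] = d_.get(x, 0) + 1
--     return sorted(d_.items(), key=lambda kv: kv[1], reverse=True)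
--
-- def compute_supported_unsupported_baseline(windows_eps: List[Dict[str, Any]]) -> Tuple[int, int, str]:
--     versions = [d_norm(c.get("connector_version")) for c in windows_eps if d_norm(c.get("connector_version"))]
--     if not versions:
--         return (0, 0, "no_connector_version")
--     counts = d_count_top(versions)
--     baseline = counts[0][0]
--     sup = 0
--     uns = 0
--     for c in windows_eps:
--         v = d_norm(c.get("connector_version"))
--         if not v:
--             continue
--         if v == baseline:
--             sup += 1
--         else:
--             uns += 1
--     return (sup, uns, baseline)
-- ===== SOURCE B (Python) =====
-- def compute_supported_unsupported_baseline(windows_eps):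
--     # One pass: build the version counter and the non-empty total together;
--     # baseline = first key attaining the max count (single max scan, no sort);
--     # sup/uns derived from the counter instead of a second loop over windows_eps.
--     counts = {}
--     total = 0
--     for c in windows_eps:
--         raw = c.get("connector_version")
--         v = (str(raw) if raw is not None else "").strip()
--         if v:
--             counts[v] = counts.get(v, 0) + 1
--             total += 1
--     if total == 0:
--         return (0, 0, "no_connector_version")
--     baseline, sup = max(counts.items(), key=lambda kv: kv[1])
--     return (sup, total - sup, baseline)
-- ===== Notes on version B (the rewrite author's own statement) =====
-- stated objective: alternative
-- what changed: B builds the version counter and the non-empty total in one pass over windows_eps, picks the baseline as the first max-count dict entry (a single max scan instead of a stable sort), and derives the supported/unsupported counts from the counter instead of a second loop over windows_eps.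
import Mathlib
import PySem

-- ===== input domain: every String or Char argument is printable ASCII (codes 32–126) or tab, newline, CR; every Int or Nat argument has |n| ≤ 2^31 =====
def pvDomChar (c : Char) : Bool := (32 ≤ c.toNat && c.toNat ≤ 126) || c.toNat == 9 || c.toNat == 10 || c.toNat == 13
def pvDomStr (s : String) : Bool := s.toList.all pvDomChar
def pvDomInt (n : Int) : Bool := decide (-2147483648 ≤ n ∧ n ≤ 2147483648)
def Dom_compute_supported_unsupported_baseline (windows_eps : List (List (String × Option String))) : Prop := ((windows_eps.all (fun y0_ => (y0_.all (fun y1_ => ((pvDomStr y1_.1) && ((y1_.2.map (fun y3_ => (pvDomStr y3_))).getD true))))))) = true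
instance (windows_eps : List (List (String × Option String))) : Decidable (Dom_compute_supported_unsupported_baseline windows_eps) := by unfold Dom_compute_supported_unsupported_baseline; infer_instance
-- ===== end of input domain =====

-- B builds the version counter and the non-empty total in one pass, picks the baseline as the
-- first max-count entry (a single max scan instead of a sort) and derives sup/uns from the
-- counter instead of a second loop over windows_eps (alternative decomposition, same cost).

-- ===== PORT A =====
-- d_norm(x) for x : Optional[str]
def d_norm (x : Option String) : String := PySem.Str.strip (x.getD "")

-- c.get("connector_version")  (value type Optional[str]; missing key → None)
def pvGetCV (c : List (String × Option String)) : Option String :=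
  ((PySem.Dict.mk c).get? "connector_version").getD none

-- d_count_top(items)
def d_count_top (items : List String) : List (String × Int) :=
  let d := items.foldl (fun d x =>
    let x := if PySem.Str.strip x = "" then "Unknown" else PySem.Str.strip x
    d.insert x (d.getD x 0 + 1)) (PySem.Dict.empty)
  PySem.List.sorted d.items (fun kv => kv.2) true

def compute_supported_unsupported_baseline (windows_eps : List (List (String × Option String))) : Int × Int × String :=
  let versions := (windows_eps.filter (fun c => d_norm (pvGetCV c) ≠ "")).map (fun c => d_norm (pvGetCV c))
  if versions = [] then (0, 0, "no_connector_version")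
  else
    let counts := d_count_top versions
    let baseline := (counts.headD ("", 0)).1
    let su := windows_eps.foldl (fun (p : Int × Int) c =>
      let v := d_norm (pvGetCV c)
      if v = "" then p
      else if v = baseline then (p.1 + 1, p.2) else (p.1, p.2 + 1)) (0, 0)
    (su.1, su.2, baseline)

-- ===== PORT B =====
def compute_supported_unsupported_baseline_alt (windows_eps : List (List (String × Option String))) : Int × Int × String :=
  let st := windows_eps.foldl (fun (st : PySem.Dict String Int × Int) c =>
    let raw := ((PySem.Dict.mk c).get? "connector_version").getD none
    let v := PySem.Str.strip (raw.getD "")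
    if v = "" then st
    else (st.1.insert v (st.1.getD v 0 + 1), st.2 + 1)) (PySem.Dict.empty, 0)
  if st.2 = 0 then (0, 0, "no_connector_version")
  else
    match PySem.List.max? st.1.items (fun kv => kv.2) with
    | some bs => (bs.2, st.2 - bs.2, bs.1)
    | none => (0, 0, "no_connector_version")   -- unreachable: the dict is non-empty here

-- ===== PRECONDITION & SPEC =====
def Spec_compute_supported_unsupported_baseline (windows_eps : List (List (String × Option String))) (out : Int × Int × String) : Prop := out = compute_supported_unsupported_baseline_alt windows_eps
instance (windows_eps : List (List (String × Option String))) (out : Int × Int × String) : Decidable (Spec_compute_supported_unsupported_baseline windows_eps out) := by unfold Spec_compute_supported_unsupported_baseline; infer_instance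

-- ===== CLAIM (what is proved, stated in full; the proofs are below) =====
def Claim_equal_compute_supported_unsupported_baseline : Prop := ∀ (windows_eps : List (List (String × Option String))), Dom_compute_supported_unsupported_baseline windows_eps → Spec_compute_supported_unsupported_baseline windows_eps (compute_supported_unsupported_baseline windows_eps)

-- ===== LEMMAS AND PROOFS =====

-- the normalized version of one endpoint row, and the list of non-empty normalized versions
def pvF (c : List (String × Option String)) : String :=
  PySem.Str.strip ((((PySem.Dict.mk c).get? "connector_version").getD none).getD "")
def pvV (ws : List (List (String × Option String))) : List String :=
  (ws.map pvF).filter (fun v => decide (v ≠ ""))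

-- a head of dropWhile does not satisfy the predicate
theorem pvHeadDropWhile (p : Char → Bool) (l : List Char) (a : Char) (u : List Char)
    (h : List.dropWhile p l = a :: u) : p a = false := by
  induction l with
  | nil => simp at h
  | cons x xs ih =>
    rw [List.dropWhile_cons] at h
    by_cases hp : p x
    · simp [hp] at h; exact ih h
    · simp [hp] at h; rw [← h.1]; simpa using hp

-- Python str.strip() is idempotent
theorem pvStripIdem (s : List Char) : PySem.Chars.strip (PySem.Chars.strip s) = PySem.Chars.strip s := by
  show PySem.Chars.rstrip (PySem.Chars.lstrip (PySem.Chars.rstrip (PySem.Chars.lstrip s))) = _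
  have h1 : PySem.Chars.lstrip (PySem.Chars.rstrip (PySem.Chars.lstrip s)) = PySem.Chars.rstrip (PySem.Chars.lstrip s) := by
    have hpre : PySem.Chars.rstrip (PySem.Chars.lstrip s) <+: PySem.Chars.lstrip s := by
      unfold PySem.Chars.rstrip
      have := List.dropWhile_suffix (l := (PySem.Chars.lstrip s).reverse) PySem.Chars.isspace
      simpa using List.reverse_prefix.mpr this
    cases hr : PySem.Chars.rstrip (PySem.Chars.lstrip s) with
    | nil => simp [PySem.Chars.lstrip]
    | cons a u =>
      rw [hr] at hpre
      obtain ⟨w, hw⟩ := hpre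
      have hls : List.dropWhile PySem.Chars.isspace s = a :: (u ++ w) := by
        simpa [PySem.Chars.lstrip] using hw.symm
      have hpa := pvHeadDropWhile _ _ _ _ hls
      simp [PySem.Chars.lstrip, hpa]
  rw [h1]
  unfold PySem.Chars.rstrip
  rw [List.reverse_reverse, List.dropWhile_idempotent]
  rfl

theorem pvStrStripIdem (s : String) : PySem.Str.strip (PySem.Str.strip s) = PySem.Str.strip s := by
  unfold PySem.Str.strip
  rw [String.toList_ofList, pvStripIdem]

-- the head of the accumulator under insertBy (reverse comparison) evolves as a running max
theorem pvHeadInsertBy {α κ : Type} [LT κ] [DecidableLT κ] (key : α → κ) (x : α) (acc : List α) :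
    (PySem.List.insertBy (fun a b => decide (key b < key a)) x acc).head? =
      (match acc.head? with
        | none => some x
        | some m => if key m < key x then some x else some m) := by
  cases acc with
  | nil => simp [PySem.List.insertBy]
  | cons y ys =>
    simp only [PySem.List.insertBy, List.head?_cons]
    by_cases h : key y < key x <;> simp [h]

theorem pvHeadFoldlInsertBy {α κ : Type} [LT κ] [DecidableLT κ] (key : α → κ) (xs : List α) (acc : List α) :
    (xs.foldl (fun acc x => PySem.List.insertBy (fun a b => decide (key b < key a)) x acc) acc).head? =
      xs.foldl (fun m x =>
        match m with
        | none => some x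
        | some m => if key m < key x then some x else some m) acc.head? := by
  induction xs generalizing acc with
  | nil => rfl
  | cons x xs ih => rw [List.foldl_cons, List.foldl_cons, ih, pvHeadInsertBy]

-- head of Python's stable sorted(…, reverse=True) is the FIRST maximal element, i.e. max(…)
theorem pvHeadSortedRev {α κ : Type} [LT κ] [DecidableLT κ] (xs : List α) (key : α → κ) :
    (PySem.List.sorted xs key true).head? = PySem.List.max? xs key := by
  unfold PySem.List.sorted PySem.List.max?
  simpa using pvHeadFoldlInsertBy key xs []

-- B's single pass builds the counter of pvV ws together with its length
theorem pvB1 (ws : List (List (String × Option String))) (d : PySem.Dict String Int) (t : Int) :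
    ws.foldl (fun (st : PySem.Dict String Int × Int) c =>
      if PySem.Str.strip ((((PySem.Dict.mk c).get? "connector_version").getD none).getD "") = "" then st
      else (st.1.insert (PySem.Str.strip ((((PySem.Dict.mk c).get? "connector_version").getD none).getD ""))
              (st.1.getD (PySem.Str.strip ((((PySem.Dict.mk c).get? "connector_version").getD none).getD "")) 0 + 1),
            st.2 + 1)) (d, t)
    = ((pvV ws).foldl (fun d v => d.insert v (d.getD v 0 + 1)) d, t + ((pvV ws).length : Int)) := by
  induction ws generalizing d t with
  | nil => simp [pvV]
  | cons c tl ih =>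
    simp only [List.foldl_cons]
    by_cases h : pvF c = ""
    · have hv : pvV (c :: tl) = pvV tl := by simp [pvV, h]
      rw [hv]
      have hfc : PySem.Str.strip ((((PySem.Dict.mk c).get? "connector_version").getD none).getD "") = "" := h
      simp only [hfc]
      exact ih d t
    · have hv : pvV (c :: tl) = pvF c :: pvV tl := by simp [pvV, h]
      rw [hv]
      have hfc : ¬ PySem.Str.strip ((((PySem.Dict.mk c).get? "connector_version").getD none).getD "") = "" := h
      simp only [hfc, if_false]
      rw [ih]
      simp only [List.foldl_cons, List.length_cons, Prod.mk.injEq]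
      exact ⟨rfl, by push_cast; ring⟩

-- A's second loop over windows_eps counts matches/mismatches of the baseline among pvV ws
theorem pvA2 (b : String) (ws : List (List (String × Option String))) (s u : Int) :
    ws.foldl (fun (p : Int × Int) c =>
      if d_norm (pvGetCV c) = "" then p
      else if d_norm (pvGetCV c) = b then (p.1 + 1, p.2)
      else (p.1, p.2 + 1)) (s, u)
    = (s + ((pvV ws).countP (fun v => decide (v = b)) : Int),
       u + ((pvV ws).countP (fun v => !decide (v = b)) : Int)) := by
  induction ws generalizing s u with
  | nil => simp [pvV]
  | cons c tl ih =>
    simp only [List.foldl_cons]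
    by_cases h : pvF c = ""
    · have hv : pvV (c :: tl) = pvV tl := by simp [pvV, h]
      rw [hv]
      have hfc : d_norm (pvGetCV c) = "" := h
      simp only [hfc]
      exact ih s u
    · have hv : pvV (c :: tl) = pvF c :: pvV tl := by simp [pvV, h]
      rw [hv]
      have hfc : ¬ d_norm (pvGetCV c) = "" := h
      simp only [hfc, if_false]
      by_cases hb : pvF c = b
      · have hfb : d_norm (pvGetCV c) = b := hb
        simp only [hfb, ih]
        rw [List.countP_cons_of_pos (p := fun v => decide (v = b)) (l := pvV tl) (by simp [hb]),
            List.countP_cons_of_neg (p := fun v => !decide (v = b)) (l := pvV tl) (by simp [hb])]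
        simp only [Prod.mk.injEq]
        exact ⟨by push_cast; ring, rfl⟩
      · have hfb : ¬ d_norm (pvGetCV c) = b := hb
        simp only [hfb, if_false, ih]
        rw [List.countP_cons_of_neg (p := fun v => decide (v = b)) (l := pvV tl) (by simp [hb]),
            List.countP_cons_of_pos (p := fun v => !decide (v = b)) (l := pvV tl) (by simp [hb])]
        simp only [Prod.mk.injEq]
        exact ⟨trivial, by push_cast; ring⟩

-- every element of pvV ws is a non-empty strip-fixpoint
theorem pvMemV (ws : List (List (String × Option String))) (x : String) (hx : x ∈ pvV ws) :
    PySem.Str.strip x = x ∧ x ≠ "" := by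
  unfold pvV at hx
  rw [List.mem_filter] at hx
  obtain ⟨hm, hne⟩ := hx
  obtain ⟨c, _, rfl⟩ := List.mem_map.mp hm
  exact ⟨pvStrStripIdem _, by simpa using hne⟩

-- d_count_top's counting loop over pvV ws is the plain insert-counter (= collections.Counter)
theorem pvAC (ws : List (List (String × Option String))) :
    (pvV ws).foldl (fun d x =>
        let x' := if PySem.Str.strip x = "" then "Unknown" else PySem.Str.strip x
        d.insert x' (d.getD x' 0 + 1)) (PySem.Dict.empty (κ := String) (ν := Int))
      = PySem.Dict.counter (pvV ws) := by
  rw [← PySem.Dict.foldl_insert_getD_add_one_eq_counter]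
  apply PySem.List.foldl_congr_mem
  intro acc x hx
  obtain ⟨hs, hne⟩ := pvMemV ws x hx
  simp only [hs, if_neg hne]

theorem pvMain (ws : List (List (String × Option String))) :
    compute_supported_unsupported_baseline ws = compute_supported_unsupported_baseline_alt ws := by
  have hver : (ws.filter (fun c => d_norm (pvGetCV c) ≠ "")).map (fun c => d_norm (pvGetCV c)) = pvV ws := by
    simp [pvV, pvF, d_norm, pvGetCV, List.filter_map, Function.comp_def]
    rfl
  have hB := pvB1 ws PySem.Dict.empty 0
  by_cases hV : pvV ws = []
  · simp only [compute_supported_unsupported_baseline, compute_supported_unsupported_baseline_alt,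
      hver, hB]
    simp [hV]
  · obtain ⟨v0, tl0, hV0⟩ := List.exists_cons_of_ne_nil hV
    have hlen : (pvV ws).length ≠ 0 := by simp [hV0]
    have hitems : (PySem.Dict.counter (pvV ws)).items
        = (PySem.Set.ofList (pvV ws)).map (fun k => (k, ((pvV ws).count k : Int))) :=
      PySem.Dict.items_counter (pvV ws)
    have hitems_ne : (PySem.Dict.counter (pvV ws)).items ≠ [] := by
      rw [hitems]
      have : v0 ∈ PySem.Set.ofList (pvV ws) := by
        rw [PySem.Set.mem_ofList, hV0]; exact List.mem_cons_self
      exact fun h => by simp [List.map_eq_nil_iff] at h; rw [h] at this; simp at this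
    cases hmax : PySem.List.max? (PySem.Dict.counter (pvV ws)).items (fun kv => kv.2) with
    | none => rw [PySem.List.max?_eq_none_iff] at hmax; exact absurd hmax hitems_ne
    | some m =>
      have hmem := PySem.List.max?_mem hmax
      rw [hitems] at hmem
      obtain ⟨k, hk, hmk⟩ := List.mem_map.mp hmem
      have hm2 : m.2 = ((pvV ws).count m.1 : Int) := by rw [← hmk]
      have hA : compute_supported_unsupported_baseline ws
          = (((pvV ws).countP (fun v => decide (v = m.1)) : Int),
             ((pvV ws).countP (fun v => !decide (v = m.1)) : Int), m.1) := by
        simp only [compute_supported_unsupported_baseline, hver, if_neg hV, d_count_top]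
        have hdict : (pvV ws).foldl (fun d x =>
            let x' := if PySem.Str.strip x = "" then "Unknown" else PySem.Str.strip x
            d.insert x' (d.getD x' 0 + 1)) (PySem.Dict.empty (κ := String) (ν := Int))
            = PySem.Dict.counter (pvV ws) := pvAC ws
        rw [hdict]
        have hbase : ((PySem.List.sorted (PySem.Dict.counter (pvV ws)).items (fun kv => kv.2) true).headD ("", 0)).1 = m.1 := by
          rw [List.headD_eq_head?_getD, pvHeadSortedRev, hmax]; rfl
        rw [hbase]
        rw [pvA2 m.1 ws 0 0]
        simp
      have hBv : compute_supported_unsupported_baseline_alt ws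
          = (m.2, ((pvV ws).length : Int) - m.2, m.1) := by
        simp only [compute_supported_unsupported_baseline_alt, hB,
          PySem.Dict.foldl_insert_getD_add_one_eq_counter]
        have h0 : (0 : Int) + ((pvV ws).length : Int) ≠ 0 := by
          intro h
          exact hlen (by omega)
        rw [if_neg h0, hmax]
        simp
      rw [hA, hBv]
      have hcount : (pvV ws).countP (fun v => decide (v = m.1)) = (pvV ws).count m.1 := by
        rw [List.count_eq_countP]
        exact List.countP_congr (fun x _ => by simp [Bool.beq_eq_decide_eq, eq_comm])
      have hsplit : (pvV ws).countP (fun v => decide (v = m.1))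
          + (pvV ws).countP (fun v => !decide (v = m.1)) = (pvV ws).length := by
        simpa using (List.length_eq_countP_add_countP (p := fun v => decide (v = m.1)) (l := pvV ws)).symm
      refine Prod.ext ?_ (Prod.ext ?_ rfl)
      · simp [hm2, hcount]
      · simp only [hm2]
        omega

-- ===== VERDICT (by name: the statement is the Claim_ definition above) =====
theorem compute_supported_unsupported_baseline_spec : Claim_equal_compute_supported_unsupported_baseline := by
  intro ws _
  unfold Spec_compute_supported_unsupported_baseline
  exact pvMain ws
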